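-- pv_equiv track=rewrite | github.com/ItsSamarth/ds-python | DataStructures/string/run-length-encoding.py | runLengthEncodingSet
-- ===== SOURCE A (Python) =====
-- def runLengthEncodingSet(input):
--     set = (input)
--     dict = {}
--     for i in set:
--         dict[i] = 0
--
--     for ch in input:
--         dict[ch] += 1
--
--     encodedString = ''
--     for key, value in dict.items():
--         encodedString += key + str(value)
--
--     return encodedString
-- ===== SOURCE B (Python) =====
-- def runLengthEncodingSet(input):
--     if input == '':
--         return ''
--     ch = input[0]
--     rest = ''.join(c for c in input[1:] if c != ch)
--     return ch + str(len(input) - len(rest)) + runLengthEncodingSet(rest)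
-- ===== Notes on version B (the rewrite author's own statement) =====
-- stated objective: alternative
-- what changed: Replaces A's dict frequency table (zero-init pass, increment pass, items iteration) with a recursive peel: emit the first character with its count obtained as a length difference after stripping all its occurrences, then recurse on the stripped remainder.
import Mathlib
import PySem

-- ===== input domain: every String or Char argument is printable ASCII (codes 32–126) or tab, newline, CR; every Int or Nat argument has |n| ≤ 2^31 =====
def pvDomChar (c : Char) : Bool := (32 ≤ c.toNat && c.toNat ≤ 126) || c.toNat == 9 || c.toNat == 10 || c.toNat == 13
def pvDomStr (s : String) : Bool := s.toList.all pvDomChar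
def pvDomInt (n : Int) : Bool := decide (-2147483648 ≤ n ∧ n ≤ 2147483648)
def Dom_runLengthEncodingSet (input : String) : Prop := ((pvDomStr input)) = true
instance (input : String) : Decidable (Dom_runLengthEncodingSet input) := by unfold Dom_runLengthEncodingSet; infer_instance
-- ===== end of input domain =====

-- B replaces A's dict frequency table with a recursive peel: emit the first character with its
-- occurrence count (as a length difference), strip all its occurrences, recurse on the remainder
-- (alternative decomposition, same results).


-- ===== PORT A =====
-- set = input; dict = {}; for i in set: dict[i] = 0; for ch in input: dict[ch] += 1;
-- encodedString = ''; for key, value in dict.items(): encodedString += key + str(value)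
def runLengthEncodingSet (input : String) : String :=
  let st := input.toList
  let d0 := st.foldl (fun d i => d.insert i (0 : Int)) PySem.Dict.empty
  let d1 := input.toList.foldl (fun d ch => d.insert ch (d.getD ch 0 + 1)) d0
  d1.items.foldl (fun acc p => acc ++ (String.ofList [p.1] ++ PySem.Int.toStr p.2)) ""

-- ===== PORT B =====
-- if input == '': return ''; ch = input[0]; rest = ''.join(c for c in input[1:] if c != ch);
-- return ch + str(len(input) - len(rest)) + runLengthEncodingSet(rest)
-- (worked on the List Char side: ''.join of the filtered comprehension over input[1:] is t.filter,
-- len(input) = 1 + t.length; both exact for every string)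
def rleGo : List Char → List Char
  | [] => []
  | c :: t =>
    c :: (PySem.Int.toChars ((1 + (t.length : Int)) - ((t.filter (fun x => !(x == c))).length : Int))
      ++ rleGo (t.filter (fun x => !(x == c))))
termination_by l => l.length
decreasing_by
  simp only [List.length_cons, List.length_unattach]
  exact Nat.lt_succ_of_le (le_trans (List.length_filter_le _ _) (by simp))

def runLengthEncodingSet_alt (input : String) : String :=
  String.ofList (rleGo input.toList)

-- ===== PRECONDITION & SPEC =====
def Spec_runLengthEncodingSet (input : String) (out : String) : Prop := out = runLengthEncodingSet_alt input
instance (input : String) (out : String) : Decidable (Spec_runLengthEncodingSet input out) := by unfold Spec_runLengthEncodingSet; infer_instance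

-- ===== CLAIM (what is proved, stated in full; the proofs are below) =====
def Claim_equal_runLengthEncodingSet : Prop := ∀ (input : String), Dom_runLengthEncodingSet input → Spec_runLengthEncodingSet input (runLengthEncodingSet input)

-- ===== LEMMAS AND PROOFS =====

-- the zero-initialisation loop leaves every getD _ 0 at 0
theorem getD_init_zero (cs : List Char) (d : PySem.Dict Char Int)
    (h : ∀ v, d.getD v 0 = 0) (v : Char) :
    (cs.foldl (fun d i => d.insert i (0 : Int)) d).getD v 0 = 0 := by
  induction cs generalizing d with
  | nil => exact h v
  | cons c cs ih =>
      simp only [List.foldl_cons]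
      exact ih _ (fun w => by rw [PySem.Dict.getD_insert]; split <;> simp [h])

-- keys of the init loop from empty: the distinct chars in order
theorem keys_init (cs : List Char) :
    ((cs.foldl (fun d i => d.insert i (0 : Int)) PySem.Dict.empty).keys) = PySem.Set.ofList cs := by
  rw [PySem.Dict.keys_foldl_insert]
  simp [PySem.Dict.keys_empty, PySem.Set.update_nil_left]

-- Set.update s cs = s when every element of cs is already in s
theorem set_update_self (s : List Char) (cs : List Char) (h : ∀ x ∈ cs, x ∈ s) :
    PySem.Set.update s cs = s := by
  rw [PySem.Set.update_eq_append_filter]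
  have : (PySem.Set.ofList cs).filter (fun y => !(PySem.Set.contains s y)) = [] := by
    rw [List.filter_eq_nil_iff]
    intro a ha
    have hm : a ∈ s := h a ((PySem.Set.mem_ofList cs a).mp ha)
    simpa using hm
  rw [this, List.append_nil]

-- A's string-building loop, seen on the character-list side
theorem strfold (l : List (Char × Int)) (a : String) :
    (l.foldl (fun acc p => acc ++ (String.ofList [p.1] ++ PySem.Int.toStr p.2)) a).toList
      = a.toList ++ (l.map (fun p => p.1 :: PySem.Int.toChars p.2)).flatten := by
  induction l generalizing a with
  | nil => simp
  | cons p l ih =>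
      simp [ih, String.toList_append, String.toList_ofList, PySem.Int.toList_toStr]

-- filter commutes with first-appearance dedup
theorem filter_ofList (p : Char → Bool) (xs : List Char) :
    (PySem.Set.ofList xs).filter p = PySem.Set.ofList (xs.filter p) := by
  induction xs with
  | nil => simp [PySem.Set.ofList_nil]
  | cons x xs ih =>
      rw [PySem.Set.ofList_cons]
      by_cases hp : p x
      · simp only [PySem.Set.discard, List.filter_cons, hp, List.filter_filter,
          PySem.Set.ofList_cons, if_pos]
        congr 1
        rw [← ih, List.filter_filter]
        exact List.filter_congr (fun a _ => by rw [Bool.and_comm])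
      · simp only [PySem.Set.discard, List.filter_cons, hp, List.filter_filter,
          Bool.false_eq_true, if_false]
        rw [← ih]
        exact List.filter_congr (fun a _ => by
          by_cases h : a = x <;> simp [h, hp])

-- the count kept by B's length difference
theorem countP_not_beq_add_count (t : List Char) (c : Char) :
    t.countP (fun x => !(x == c)) + t.count c = t.length := by
  induction t with
  | nil => simp
  | cons a t ih =>
      by_cases h : a = c <;>
        simp [h, ← ih] <;> omega

-- B computes the flattened char+count blocks over the distinct characters in order
theorem rleGo_eq_aux (n : Nat) : ∀ (cs : List Char), cs.length ≤ n →
    rleGo cs = ((PySem.Set.ofList cs).map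
        (fun k => k :: PySem.Int.toChars ((cs.count k : Int)))).flatten := by
  induction n with
  | zero =>
      intro cs hlen
      have : cs = [] := List.eq_nil_of_length_eq_zero (Nat.le_zero.mp hlen)
      subst this
      simp [rleGo, PySem.Set.ofList_nil]
  | succ n ihn =>
      intro cs hlen
      match cs with
      | [] => simp [rleGo, PySem.Set.ofList_nil]
      | c :: t =>
      have ih := ihn (t.filter (fun x => !(x == c)))
        (le_trans (List.length_filter_le _ _) (Nat.le_of_succ_le_succ hlen))
      rw [rleGo]
      have hset : PySem.Set.ofList (c :: t)
          = c :: PySem.Set.ofList (t.filter (fun x => !(x == c))) := by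
        rw [PySem.Set.ofList_cons, PySem.Set.discard, filter_ofList]
      rw [hset, List.map_cons, List.flatten_cons]
      have hcnt : (1 + (t.length : Int)) - (((t.filter (fun x => !(x == c))).length : Nat) : Int)
          = (((c :: t).count c : Nat) : Int) := by
        have h1 : (t.filter (fun x => !(x == c))).length = t.countP (fun x => !(x == c)) :=
          List.countP_eq_length_filter.symm
        have h2 := countP_not_beq_add_count t c
        simp only [List.count_cons, BEq.rfl, if_pos]
        omega
      rw [hcnt, ih]
      congr 1
      congr 1
      congr 1
      apply List.map_congr_left
      intro k hk
      have hkrest : k ∈ t.filter (fun x => !(x == c)) := (PySem.Set.mem_ofList _ k).mp hk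
      have hkc : ¬ (k == c) = true := by
        have := List.of_mem_filter hkrest
        simpa using this
      have hne : k ≠ c := by simpa using hkc
      have hc1 : (t.filter (fun x => !(x == c))).count k = t.count k := by
        rw [List.count_filter (by simpa using hne)]
      have hc2 : (c :: t).count k = t.count k := by
        simp [Ne.symm hne]
      rw [hc1, hc2]

-- ===== VERDICT (by name: the statement is the Claim_ definition above) =====
theorem runLengthEncodingSet_spec : Claim_equal_runLengthEncodingSet := by
  intro input _
  unfold Spec_runLengthEncodingSet runLengthEncodingSet runLengthEncodingSet_alt
  set cs := input.toList with hcs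
  simp only []
  set d0 := cs.foldl (fun d i => d.insert i (0 : Int)) PySem.Dict.empty with hd0
  set d1 := cs.foldl (fun d ch => d.insert ch (d.getD ch 0 + 1)) d0 with hd1
  have hk0 : d0.keys = PySem.Set.ofList cs := keys_init cs
  have hk1 : d1.keys = PySem.Set.ofList cs := by
    rw [hd1, PySem.Dict.keys_foldl_insert, hk0]
    exact set_update_self _ _ (fun x hx => (PySem.Set.mem_ofList cs x).mpr hx)
  have hnd : d1.keys.Nodup := by rw [hk1]; exact PySem.Set.nodup_ofList cs
  have hval : ∀ v, d1.getD v 0 = (cs.count v : Int) := by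
    intro v
    rw [hd1, PySem.Dict.getD_foldl_insert_add_one,
        getD_init_zero cs PySem.Dict.empty (fun w => PySem.Dict.getD_empty w 0)]
    ring
  have hitems : d1.items = (PySem.Set.ofList cs).map (fun k => (k, (cs.count k : Int))) := by
    rw [PySem.Dict.items_eq_map_keys d1 hnd 0, hk1]
    exact List.map_congr_left (fun k _ => by rw [hval k])
  apply String.toList_inj.mp
  rw [strfold, hitems, String.toList_ofList, rleGo_eq_aux cs.length cs le_rfl, List.map_map]
  simp [Function.comp_def]
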